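-- pv_equiv track=rewrite | github.com/mateuszsury/MicroPythonZigbee | python/uzigbee/commissioning.py | channel_mask_to_single_channel
-- ===== SOURCE A (Python) =====
-- def channel_mask_to_single_channel(channel_mask):
--     if channel_mask is None:
--         return None
--     mask = int(channel_mask)
--     if mask <= 0:
--         return None
--     if mask & (mask - 1):
--         return None
--     channel = 0
--     while mask > 1:
--         mask >>= 1
--         channel += 1
--     if channel < 11 or channel > 26:
--         return None
--     return int(channel)
-- ===== SOURCE B (Python) =====
-- _CHANNEL_BY_MASK = {1 << ch: ch for ch in range(11, 27)}
--
--
-- def channel_mask_to_single_channel(channel_mask):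
--     if channel_mask is None:
--         return None
--     return _CHANNEL_BY_MASK.get(int(channel_mask))
-- ===== Notes on version B (the rewrite author's own statement) =====
-- stated objective: simpler
-- what changed: Replaces A's guard chain (sign test, power-of-two bit trick, shift-count loop, range check) with a single lookup in a precomputed dict mapping each valid mask 1<<ch (ch in 11..26) to its channel.
import Mathlib
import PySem

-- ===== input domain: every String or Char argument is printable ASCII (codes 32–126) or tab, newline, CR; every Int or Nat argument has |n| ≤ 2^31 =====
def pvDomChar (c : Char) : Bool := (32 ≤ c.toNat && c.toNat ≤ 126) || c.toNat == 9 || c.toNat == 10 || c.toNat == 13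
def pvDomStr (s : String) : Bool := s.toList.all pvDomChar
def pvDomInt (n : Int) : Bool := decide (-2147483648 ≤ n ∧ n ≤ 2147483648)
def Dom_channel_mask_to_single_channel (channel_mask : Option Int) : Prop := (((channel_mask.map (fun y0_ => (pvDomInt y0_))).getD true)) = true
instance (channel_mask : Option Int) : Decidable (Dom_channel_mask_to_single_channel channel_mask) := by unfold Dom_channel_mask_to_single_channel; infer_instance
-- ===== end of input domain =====

-- B replaces A's guard chain and shift-count loop with one lookup in a precomputed
-- dict {1 << ch: ch for ch in range(11, 27)}; objective: simpler.

-- ===== PORT A =====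
-- A's 'while mask > 1: mask >>= 1; channel += 1'; mask is positive here, so it
-- is carried as a Nat and '>> 1' is '/ 2' (exact for nonnegative Python ints).
def pvShiftLoop (mask : Nat) (channel : Int) : Int :=
  if mask > 1 then pvShiftLoop (mask / 2) (channel + 1) else channel

def channel_mask_to_single_channel (channel_mask : Option Int) : Option Int :=
  match channel_mask with
  | none => none
  | some mask =>
    if mask ≤ 0 then none
    else if mask.toNat &&& (mask.toNat - 1) ≠ 0 then none
    else
      let channel := pvShiftLoop mask.toNat 0
      if channel < 11 ∨ channel > 26 then none
      else some channel

-- ===== PORT B =====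
-- the module-level dict _CHANNEL_BY_MASK = {1 << ch: ch for ch in range(11, 27)}
def pvChannelByMask : PySem.Dict Int Int :=
  (PySem.List.pyRange 11 27 1).foldl
    (fun d ch => d.insert ((1:Int) <<< ch.toNat) ch) PySem.Dict.empty

def channel_mask_to_single_channel_alt (channel_mask : Option Int) : Option Int :=
  match channel_mask with
  | none => none
  | some mask => pvChannelByMask.get? mask

-- ===== PRECONDITION & SPEC =====
def Spec_channel_mask_to_single_channel (channel_mask : Option Int) (out : Option Int) : Prop := out = channel_mask_to_single_channel_alt channel_mask
instance (channel_mask : Option Int) (out : Option Int) : Decidable (Spec_channel_mask_to_single_channel channel_mask out) := by unfold Spec_channel_mask_to_single_channel; infer_instance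

-- ===== CLAIM (what is proved, stated in full; the proofs are below) =====
def Claim_equal_channel_mask_to_single_channel : Prop := ∀ (channel_mask : Option Int), Dom_channel_mask_to_single_channel channel_mask → Spec_channel_mask_to_single_channel channel_mask (channel_mask_to_single_channel channel_mask)

-- ===== LEMMAS AND PROOFS =====

-- A's loop counts how often a positive mask halves to 1, i.e. its binary logarithm.
theorem pvShiftLoop_eq_log2 (m : Nat) (c : Int) (h : 1 ≤ m) :
    pvShiftLoop m c = c + (Nat.log2 m : Int) := by
  induction m using Nat.strong_induction_on generalizing c with
  | _ m ih =>
    rw [pvShiftLoop]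
    by_cases h2 : m > 1
    · rw [if_pos h2, ih (m / 2) (by omega) _ (by omega)]
      have hl : Nat.log2 m = Nat.log2 (m / 2) + 1 := by
        rw [Nat.log2_eq_log_two, Nat.log2_eq_log_two,
          Nat.log_of_one_lt_of_le (by omega) (by omega)]
      rw [hl]
      push_cast
      ring
    · rw [if_neg h2]
      have hm : m = 1 := by omega
      subst hm
      simp [Nat.log2]

-- the dict B builds, evaluated to its literal association list
theorem pvChannelByMask_eq : pvChannelByMask = PySem.Dict.mk
    [((2048:Int), (11:Int)), ((4096:Int), (12:Int)), ((8192:Int), (13:Int)), ((16384:Int), (14:Int)), ((32768:Int), (15:Int)), ((65536:Int), (16:Int)), ((131072:Int), (17:Int)), ((262144:Int), (18:Int)), ((524288:Int), (19:Int)), ((1048576:Int), (20:Int)), ((2097152:Int), (21:Int)), ((4194304:Int), (22:Int)), ((8388608:Int), (23:Int)), ((16777216:Int), (24:Int)), ((33554432:Int), (25:Int)), ((67108864:Int), (26:Int))] := by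
  decide

-- a positive value whose 'mask & (mask - 1)' vanishes is exactly a power of two
theorem pvPow2_of_and_pred (m : Nat) (h1 : 1 ≤ m) (h : m &&& (m - 1) = 0) :
    m = 2 ^ Nat.log2 m := by
  by_contra hne
  have hle : 2 ^ Nat.log2 m ≤ m := Nat.log2_self_le (by omega)
  have hlt : m < 2 ^ (Nat.log2 m + 1) := Nat.lt_log2_self
  have t1 : m.testBit (Nat.log2 m) = true :=
    Nat.testBit_of_two_pow_le_and_two_pow_add_one_gt hle hlt
  have t2 : (m - 1).testBit (Nat.log2 m) = true :=
    Nat.testBit_of_two_pow_le_and_two_pow_add_one_gt (by omega) (by omega)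
  have t0 : (m &&& (m - 1)).testBit (Nat.log2 m) = true := by
    rw [Nat.testBit_land, t1, t2]; rfl
  rw [h] at t0
  simp at t0

-- lookup in B's dict, spelled out as an if-chain over its 16 keys
set_option maxHeartbeats 1000000 in
theorem pvChannelByMask_get (m : Int) : pvChannelByMask.get? m =
    if (2048:Int) = m then some 11 else
    if (4096:Int) = m then some 12 else
    if (8192:Int) = m then some 13 else
    if (16384:Int) = m then some 14 else
    if (32768:Int) = m then some 15 else
    if (65536:Int) = m then some 16 else
    if (131072:Int) = m then some 17 else
    if (262144:Int) = m then some 18 else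
    if (524288:Int) = m then some 19 else
    if (1048576:Int) = m then some 20 else
    if (2097152:Int) = m then some 21 else
    if (4194304:Int) = m then some 22 else
    if (8388608:Int) = m then some 23 else
    if (16777216:Int) = m then some 24 else
    if (33554432:Int) = m then some 25 else
    if (67108864:Int) = m then some 26 else
    none := by
  rw [pvChannelByMask_eq]
  by_cases h1 : (2048:Int) = m
  · subst h1; decide
  ·
    by_cases h2 : (4096:Int) = m
    · subst h2; decide
    ·
      by_cases h3 : (8192:Int) = m
      · subst h3; decide
      ·
        by_cases h4 : (16384:Int) = m
        · subst h4; decide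
        ·
          by_cases h5 : (32768:Int) = m
          · subst h5; decide
          ·
            by_cases h6 : (65536:Int) = m
            · subst h6; decide
            ·
              by_cases h7 : (131072:Int) = m
              · subst h7; decide
              ·
                by_cases h8 : (262144:Int) = m
                · subst h8; decide
                ·
                  by_cases h9 : (524288:Int) = m
                  · subst h9; decide
                  ·
                    by_cases h10 : (1048576:Int) = m
                    · subst h10; decide
                    ·
                      by_cases h11 : (2097152:Int) = m
                      · subst h11; decide
                      ·
                        by_cases h12 : (4194304:Int) = m
                        · subst h12; decide
                        ·
                          by_cases h13 : (8388608:Int) = m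
                          · subst h13; decide
                          ·
                            by_cases h14 : (16777216:Int) = m
                            · subst h14; decide
                            ·
                              by_cases h15 : (33554432:Int) = m
                              · subst h15; decide
                              ·
                                by_cases h16 : (67108864:Int) = m
                                · subst h16; decide
                                ·
                                  have hnone : List.find? (fun p => p.1 == m) [((2048:Int), (11:Int)), ((4096:Int), (12:Int)), ((8192:Int), (13:Int)), ((16384:Int), (14:Int)), ((32768:Int), (15:Int)), ((65536:Int), (16:Int)), ((131072:Int), (17:Int)), ((262144:Int), (18:Int)), ((524288:Int), (19:Int)), ((1048576:Int), (20:Int)), ((2097152:Int), (21:Int)), ((4194304:Int), (22:Int)), ((8388608:Int), (23:Int)), ((16777216:Int), (24:Int)), ((33554432:Int), (25:Int)), ((67108864:Int), (26:Int))] = none := by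
                                    rw [List.find?_eq_none]
                                    intro x hx
                                    fin_cases hx <;> simp_all
                                  simp [PySem.Dict.get?, hnone, h1, h2, h3, h4, h5, h6, h7, h8, h9, h10, h11, h12, h13, h14, h15, h16]

-- A and B agree on every concrete mask: case split on sign, the power-of-two test, and the key range
set_option maxHeartbeats 1000000 in
theorem pvMainEq : ∀ mask : Int, channel_mask_to_single_channel (some mask) = channel_mask_to_single_channel_alt (some mask) := by
  intro mask
  simp only [channel_mask_to_single_channel, channel_mask_to_single_channel_alt]
  rw [pvChannelByMask_get]
  by_cases hpos : mask ≤ 0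
  · rw [if_pos hpos]
    rw [if_neg (show ¬(2048:Int) = mask by omega)]
    rw [if_neg (show ¬(4096:Int) = mask by omega)]
    rw [if_neg (show ¬(8192:Int) = mask by omega)]
    rw [if_neg (show ¬(16384:Int) = mask by omega)]
    rw [if_neg (show ¬(32768:Int) = mask by omega)]
    rw [if_neg (show ¬(65536:Int) = mask by omega)]
    rw [if_neg (show ¬(131072:Int) = mask by omega)]
    rw [if_neg (show ¬(262144:Int) = mask by omega)]
    rw [if_neg (show ¬(524288:Int) = mask by omega)]
    rw [if_neg (show ¬(1048576:Int) = mask by omega)]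
    rw [if_neg (show ¬(2097152:Int) = mask by omega)]
    rw [if_neg (show ¬(4194304:Int) = mask by omega)]
    rw [if_neg (show ¬(8388608:Int) = mask by omega)]
    rw [if_neg (show ¬(16777216:Int) = mask by omega)]
    rw [if_neg (show ¬(33554432:Int) = mask by omega)]
    rw [if_neg (show ¬(67108864:Int) = mask by omega)]
  · rw [if_neg hpos]
    by_cases hb : mask.toNat &&& (mask.toNat - 1) ≠ 0
    · rw [if_pos hb]
      rw [if_neg (show ¬(2048:Int) = mask by intro h; subst h; exact hb (by decide))]
      rw [if_neg (show ¬(4096:Int) = mask by intro h; subst h; exact hb (by decide))]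
      rw [if_neg (show ¬(8192:Int) = mask by intro h; subst h; exact hb (by decide))]
      rw [if_neg (show ¬(16384:Int) = mask by intro h; subst h; exact hb (by decide))]
      rw [if_neg (show ¬(32768:Int) = mask by intro h; subst h; exact hb (by decide))]
      rw [if_neg (show ¬(65536:Int) = mask by intro h; subst h; exact hb (by decide))]
      rw [if_neg (show ¬(131072:Int) = mask by intro h; subst h; exact hb (by decide))]
      rw [if_neg (show ¬(262144:Int) = mask by intro h; subst h; exact hb (by decide))]
      rw [if_neg (show ¬(524288:Int) = mask by intro h; subst h; exact hb (by decide))]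
      rw [if_neg (show ¬(1048576:Int) = mask by intro h; subst h; exact hb (by decide))]
      rw [if_neg (show ¬(2097152:Int) = mask by intro h; subst h; exact hb (by decide))]
      rw [if_neg (show ¬(4194304:Int) = mask by intro h; subst h; exact hb (by decide))]
      rw [if_neg (show ¬(8388608:Int) = mask by intro h; subst h; exact hb (by decide))]
      rw [if_neg (show ¬(16777216:Int) = mask by intro h; subst h; exact hb (by decide))]
      rw [if_neg (show ¬(33554432:Int) = mask by intro h; subst h; exact hb (by decide))]
      rw [if_neg (show ¬(67108864:Int) = mask by intro h; subst h; exact hb (by decide))]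
    · rw [if_neg hb]
      push Not at hb
      rw [pvShiftLoop_eq_log2 _ _ (by omega)]
      have hpow := pvPow2_of_and_pred mask.toNat (by omega) hb
      set c := Nat.log2 mask.toNat with hc
      have hm : mask = ((2 ^ c : Nat) : Int) := by rw [← hpow]; omega
      by_cases hr : 11 ≤ c ∧ c ≤ 26
      · rw [hm]
        obtain ⟨hr1, hr2⟩ := hr
        interval_cases c <;> decide
      · rw [if_pos (by omega : (0:Int) + (c:Int) < 11 ∨ (0:Int) + (c:Int) > 26)]
        have hbound : mask ≤ 1024 ∨ 134217728 ≤ mask := by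
          rcases (by omega : c ≤ 10 ∨ 27 ≤ c) with h | h
          · left
            have : mask.toNat ≤ 2 ^ 10 := by
              rw [hpow]; exact Nat.pow_le_pow_right (by norm_num) h
            omega
          · right
            have : 2 ^ 27 ≤ mask.toNat := by
              rw [hpow]; exact Nat.pow_le_pow_right (by norm_num) h
            omega
        rw [if_neg (show ¬(2048:Int) = mask by intro h; omega)]
        rw [if_neg (show ¬(4096:Int) = mask by intro h; omega)]
        rw [if_neg (show ¬(8192:Int) = mask by intro h; omega)]
        rw [if_neg (show ¬(16384:Int) = mask by intro h; omega)]
        rw [if_neg (show ¬(32768:Int) = mask by intro h; omega)]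
        rw [if_neg (show ¬(65536:Int) = mask by intro h; omega)]
        rw [if_neg (show ¬(131072:Int) = mask by intro h; omega)]
        rw [if_neg (show ¬(262144:Int) = mask by intro h; omega)]
        rw [if_neg (show ¬(524288:Int) = mask by intro h; omega)]
        rw [if_neg (show ¬(1048576:Int) = mask by intro h; omega)]
        rw [if_neg (show ¬(2097152:Int) = mask by intro h; omega)]
        rw [if_neg (show ¬(4194304:Int) = mask by intro h; omega)]
        rw [if_neg (show ¬(8388608:Int) = mask by intro h; omega)]
        rw [if_neg (show ¬(16777216:Int) = mask by intro h; omega)]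
        rw [if_neg (show ¬(33554432:Int) = mask by intro h; omega)]
        rw [if_neg (show ¬(67108864:Int) = mask by intro h; omega)]

-- ===== VERDICT (by name: the statement is the Claim_ definition above) =====
theorem channel_mask_to_single_channel_spec : Claim_equal_channel_mask_to_single_channel := by
  intro channel_mask _
  unfold Spec_channel_mask_to_single_channel
  cases channel_mask with
  | none => rfl
  | some mask => exact pvMainEq mask
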